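-- pv_equiv track=rewrite | github.com/Niko2756/ListMaker-version-one | listMaker.py | maker
-- ===== SOURCE A (Python) =====
-- def maker(dataSetOne,dataSetTwo):
-- 	finalArray = []
-- 	tempArray = []
-- 	for num in range(len(dataSetOne)):
-- 		for x in range(len(dataSetTwo)):
-- 			if [dataSetOne[num], dataSetTwo[x]] == [dataSetOne[num], dataSetOne[num]]:
-- 				pass
-- 			else:
-- 				tempArray.append([dataSetOne[num], dataSetTwo[x]])
--
-- 	for count,item in enumerate(tempArray):
-- 		if [tempArray[count][1], tempArray[count][0]] in tempArray[(count+1):]: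
-- 			pass
-- 		#if [tempArray[count][1], tempArray[count][0]] in tempArray[:count]:
-- 		else:
-- 			finalArray.append(item)
--
-- 	return finalArray
-- ===== SOURCE B (Python) =====
-- def maker(dataSetOne, dataSetTwo):
--     # one pass over the pairs from the right with a seen-set: keep a pair iff its
--     # reverse does not occur later; O(m) instead of A's O(m^2) suffix scans
--     temp = [(a, b) for a in dataSetOne for b in dataSetTwo if b != a]
--     seen = set()
--     kept = []
--     for a, b in reversed(temp):
--         if (b, a) not in seen:
--             kept.append((a, b))
--         seen.add((a, b))
--     kept.reverse()
--     return [[a, b] for a, b in kept]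
-- ===== Notes on version B (the rewrite author's own statement) =====
-- stated objective: faster
-- what changed: Replaces the per-item scan of the remaining suffix ('reverse in tempArray[count+1:]') by a single right-to-left pass that maintains a hash set of pairs already seen later, and builds the pair list with a comprehension instead of nested index loops.
import Mathlib
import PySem

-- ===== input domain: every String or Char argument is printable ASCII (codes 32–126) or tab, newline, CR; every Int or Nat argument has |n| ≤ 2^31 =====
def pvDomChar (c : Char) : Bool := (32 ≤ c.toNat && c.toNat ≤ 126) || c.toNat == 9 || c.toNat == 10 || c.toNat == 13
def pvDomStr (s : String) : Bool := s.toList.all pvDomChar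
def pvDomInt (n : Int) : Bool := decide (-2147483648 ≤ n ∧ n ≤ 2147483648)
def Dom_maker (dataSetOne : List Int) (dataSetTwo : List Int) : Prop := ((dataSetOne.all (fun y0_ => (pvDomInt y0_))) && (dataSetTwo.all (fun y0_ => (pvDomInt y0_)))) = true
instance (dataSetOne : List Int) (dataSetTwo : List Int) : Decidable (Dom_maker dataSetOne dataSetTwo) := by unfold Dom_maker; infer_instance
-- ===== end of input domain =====

-- B replaces A's quadratic per-item suffix scan by one right-to-left pass with a seen-set (measured faster; asymptotic change).

-- ===== PORT A =====
def maker (dataSetOne : List Int) (dataSetTwo : List Int) : List (List Int) :=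
  let tempArray : List (List Int) :=
    (PySem.List.pyRange 0 (dataSetOne.length : Int) 1).foldl (fun tA num =>
      (PySem.List.pyRange 0 (dataSetTwo.length : Int) 1).foldl (fun tA x =>
        if [PySem.List.pyGetD dataSetOne num 0, PySem.List.pyGetD dataSetTwo x 0]
             = [PySem.List.pyGetD dataSetOne num 0, PySem.List.pyGetD dataSetOne num 0] then tA
        else tA ++ [[PySem.List.pyGetD dataSetOne num 0, PySem.List.pyGetD dataSetTwo x 0]]) tA) []
  (PySem.List.enumerate tempArray 0).foldl (fun finalArray ci =>
    if (PySem.List.slice tempArray (some (ci.1 + 1)) none).contains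
         [PySem.List.pyGetD (PySem.List.pyGetD tempArray ci.1 []) 1 0,
          PySem.List.pyGetD (PySem.List.pyGetD tempArray ci.1 []) 0 0] then finalArray
    else finalArray ++ [ci.2]) []

-- ===== PORT B =====
def maker_alt (dataSetOne : List Int) (dataSetTwo : List Int) : List (List Int) :=
  let temp : List (Int × Int) :=
    dataSetOne.flatMap (fun a => (dataSetTwo.filter (fun b => b != a)).map (fun b => (a, b)))
  let res :=
    temp.reverse.foldl (fun (st : PySem.Set (Int × Int) × List (Int × Int)) p =>
      (PySem.Set.add st.1 p,
       if PySem.Set.contains st.1 (p.2, p.1) then st.2 else st.2 ++ [p]))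
      (PySem.Set.empty, [])
  res.2.reverse.map (fun p => [p.1, p.2])

-- ===== PRECONDITION & SPEC =====
def Spec_maker (dataSetOne : List Int) (dataSetTwo : List Int) (out : List (List Int)) : Prop := out = maker_alt dataSetOne dataSetTwo
instance (dataSetOne : List Int) (dataSetTwo : List Int) (out : List (List Int)) : Decidable (Spec_maker dataSetOne dataSetTwo out) := by unfold Spec_maker; infer_instance

-- ===== CLAIM (what is proved, stated in full; the proofs are below) =====
def Claim_equal_maker : Prop := ∀ (dataSetOne : List Int) (dataSetTwo : List Int), Dom_maker dataSetOne dataSetTwo → Spec_maker dataSetOne dataSetTwo (maker dataSetOne dataSetTwo)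

-- ===== LEMMAS AND PROOFS =====

-- the filtered result both programs compute: keep a pair iff its reverse is absent from the remaining suffix
def pvFilt : List (Int × Int) → List (Int × Int)
  | [] => []
  | p :: r => if (p.2, p.1) ∈ r then pvFilt r else p :: pvFilt r

def pvToL (p : Int × Int) : List Int := [p.1, p.2]

-- B's loop body, named so the scan invariant can be stated once
def pvStep (st : PySem.Set (Int × Int) × List (Int × Int)) (p : Int × Int) :
    PySem.Set (Int × Int) × List (Int × Int) :=
  (PySem.Set.add st.1 p,
   if PySem.Set.contains st.1 (p.2, p.1) then st.2 else st.2 ++ [p])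


theorem pvInner (d2 : List Int) (a : Int) : ∀ acc : List (List Int),
    d2.foldl (fun tA b => if b = a then tA else tA ++ [[a, b]]) acc
      = acc ++ (d2.filter (fun b => b != a)).map (fun b => [a, b]) := by
  induction d2 with
  | nil => simp
  | cons b r ih =>
    intro acc
    by_cases h : b = a <;> simp [List.foldl_cons, h, ih]

theorem pvTempA_eq (d1 d2 : List Int) :
    (PySem.List.pyRange 0 (d1.length : Int) 1).foldl (fun tA num =>
      (PySem.List.pyRange 0 (d2.length : Int) 1).foldl (fun tA x =>
        if [PySem.List.pyGetD d1 num 0, PySem.List.pyGetD d2 x 0]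
             = [PySem.List.pyGetD d1 num 0, PySem.List.pyGetD d1 num 0] then tA
        else tA ++ [[PySem.List.pyGetD d1 num 0, PySem.List.pyGetD d2 x 0]]) tA) []
    = (d1.flatMap (fun a => (d2.filter (fun b => b != a)).map (fun b => (a, b)))).map pvToL := by
  have h1 : ∀ (a : Int) (acc : List (List Int)),
      (PySem.List.pyRange 0 (d2.length : Int) 1).foldl (fun tA x =>
        if [a, PySem.List.pyGetD d2 x 0] = [a, a] then tA
        else tA ++ [[a, PySem.List.pyGetD d2 x 0]]) acc
      = acc ++ (d2.filter (fun b => b != a)).map (fun b => [a, b]) := by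
    intro a acc
    rw [PySem.List.foldl_pyRange_zero_pyGetD' d2 0
        (fun tA b => if [a, b] = [a, a] then tA else tA ++ [[a, b]]) acc]
    rw [PySem.List.foldl_congr_mem d2 _ (fun tA b => if b = a then tA else tA ++ [[a, b]]) acc
        (by intro acc b _; simp)]
    exact pvInner d2 a acc
  rw [PySem.List.foldl_pyRange_zero_pyGetD' d1 0
      (fun tA a => (PySem.List.pyRange 0 (d2.length : Int) 1).foldl (fun tA x =>
        if [a, PySem.List.pyGetD d2 x 0] = [a, a] then tA
        else tA ++ [[a, PySem.List.pyGetD d2 x 0]]) tA) []]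
  rw [PySem.List.foldl_congr_mem d1 _
      (fun tA a => tA ++ (d2.filter (fun b => b != a)).map (fun b => [a, b])) []
      (by intro acc a _; exact h1 a acc)]
  rw [PySem.List.foldl_append_eq_flatMap]
  simp only [List.map_flatMap, List.map_map, List.nil_append]
  rfl


theorem pvScan (t : List (Int × Int)) :
    (t.reverse.foldl pvStep (PySem.Set.empty, [])).2 = (pvFilt t).reverse ∧
    ∀ x, x ∈ (t.reverse.foldl pvStep (PySem.Set.empty, [])).1 ↔ x ∈ t := by
  induction t with
  | nil => simp [pvFilt, PySem.Set.empty]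
  | cons p r ih =>
    obtain ⟨ih2, ih1⟩ := ih
    rw [List.reverse_cons, List.foldl_append, List.foldl_cons, List.foldl_nil]
    set st := r.reverse.foldl pvStep (PySem.Set.empty, []) with hst
    constructor
    · show (pvStep st p).2 = _
      simp only [pvStep]
      by_cases h : (p.2, p.1) ∈ r
      · have hc : PySem.Set.contains st.1 (p.2, p.1) = true :=
          (PySem.Set.contains_iff _ _).2 ((ih1 _).2 h)
        simp only [hc, ih2, pvFilt, h, if_pos]
      · have hc : PySem.Set.contains st.1 (p.2, p.1) = false := by
          rw [Bool.eq_false_iff]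
          intro hc
          exact h ((ih1 _).1 ((PySem.Set.contains_iff _ _).1 hc))
        simp only [hc, Bool.false_eq_true, ih2, pvFilt, h, if_neg, not_false_iff]
        simp
    · intro x
      show x ∈ (pvStep st p).1 ↔ _
      simp only [pvStep]
      rw [PySem.Set.mem_add]
      rw [ih1 x]
      simp [or_comm]

theorem pvToL_inj : Function.Injective pvToL := by
  intro a b h
  simp only [pvToL, List.cons.injEq, and_true] at h
  exact Prod.ext h.1 h.2

theorem pvA2 (u : List (List Int)) : ∀ (t : List (Int × Int)) (pre : List (List Int))
    (acc : List (List Int)), u = pre ++ t.map pvToL →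
    (PySem.List.enumerate (t.map pvToL) (pre.length : Int)).foldl
      (fun fin ci =>
        if (PySem.List.slice u (some (ci.1 + 1)) none).contains
             [PySem.List.pyGetD (PySem.List.pyGetD u ci.1 []) 1 0,
              PySem.List.pyGetD (PySem.List.pyGetD u ci.1 []) 0 0] then fin
        else fin ++ [ci.2]) acc
    = acc ++ (pvFilt t).map pvToL := by
  intro t
  induction t with
  | nil => intro pre acc hu; simp [pvFilt]
  | cons p r ih =>
    intro pre acc hu
    rw [List.map_cons, PySem.List.enumerate_cons, List.foldl_cons]
    have hget : PySem.List.pyGetD u (pre.length : Int) [] = pvToL p := by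
      rw [PySem.List.pyGetD_natCast, hu, List.getD_eq_getElem?_getD,
          List.getElem?_append_right (le_refl pre.length)]
      simp
    have hslice : PySem.List.slice u (some ((pre.length : Int) + 1)) none = r.map pvToL := by
      have : ((pre.length : Int) + 1) = ((pre.length + 1 : Nat) : Int) := by push_cast; ring
      rw [this, PySem.List.slice_from_natCast, hu]
      rw [show pre ++ List.map pvToL (p :: r) = (pre ++ [pvToL p]) ++ r.map pvToL by simp]
      exact List.drop_left' (by simp)
    have h1 : PySem.List.pyGetD (pvToL p) 1 0 = p.2 := rfl
    have h0 : PySem.List.pyGetD (pvToL p) 0 0 = p.1 := rfl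
    have hcont : (r.map pvToL).contains [p.2, p.1] = decide ((p.2, p.1) ∈ r) := by
      rcases Decidable.em ((p.2, p.1) ∈ r) with h | h
      · simp only [decide_eq_true h]
        rw [List.contains_iff_mem]
        exact List.mem_map.2 ⟨(p.2, p.1), h, rfl⟩
      · simp only [decide_eq_false h]
        rw [Bool.eq_false_iff]
        intro hc
        obtain ⟨q, hq, hqeq⟩ := List.mem_map.1 (List.contains_iff_mem.1 hc)
        have hq2 : pvToL q = pvToL (p.2, p.1) := hqeq
        exact h (pvToL_inj hq2 ▸ hq)
    simp only [hget, hslice, h1, h0, hcont]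
    have hu' : u = (pre ++ [pvToL p]) ++ r.map pvToL := by rw [hu]; simp
    have hlen : ((pre ++ [pvToL p]).length : Int) = (pre.length : Int) + 1 := by
      simp
    rcases Decidable.em ((p.2, p.1) ∈ r) with h | h
    · rw [decide_eq_true h, if_pos rfl]
      rw [← hlen]
      rw [ih (pre ++ [pvToL p]) acc hu']
      simp [pvFilt, h]
    · rw [decide_eq_false h, if_neg (by simp)]
      rw [← hlen]
      rw [ih (pre ++ [pvToL p]) (acc ++ [pvToL p]) hu']
      simp [pvFilt, h]

-- ===== VERDICT (by name: the statement is the Claim_ definition above) =====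
theorem maker_spec : Claim_equal_maker := by
  intro d1 d2 _
  show maker d1 d2 = maker_alt d1 d2
  simp only [maker, maker_alt]
  rw [pvTempA_eq d1 d2]
  have hA := pvA2
    ((d1.flatMap (fun a => (d2.filter (fun b => b != a)).map (fun b => (a, b)))).map pvToL)
    (d1.flatMap (fun a => (d2.filter (fun b => b != a)).map (fun b => (a, b)))) [] [] (by simp)
  simp only [List.length_nil, Nat.cast_zero, List.nil_append] at hA
  rw [hA]
  rw [show (fun (st : PySem.Set (Int × Int) × List (Int × Int)) p =>
        (PySem.Set.add st.1 p,
         if PySem.Set.contains st.1 (p.2, p.1) then st.2 else st.2 ++ [p])) = pvStep from rfl]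
  rw [(pvScan (d1.flatMap (fun a => (d2.filter (fun b => b != a)).map (fun b => (a, b))))).1]
  simp only [List.reverse_reverse]
  rfl
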